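-- pv_equiv track=rewrite | github.com/technosutra21/technosutra | characters/parser_completo.py | extrair_subsecoes
-- ===== SOURCE A (Python) =====
-- from typing import Dict, List, Any
--
-- def extrair_subsecoes(conteudo: str) -> List[Dict[str, str]]:
--     """Extrai subseções dentro de uma seção maior"""
--     subsecoes = []
--     linhas = conteudo.split('\n')
--
--     subsecao_atual = None
--
--     for linha in linhas:
--         linha_limpa = linha.strip()
--
--         # Detecta subseções (linhas que terminam com :)
--         if linha_limpa.endswith(':') and len(linha_limpa) > 3:
--             if subsecao_atual:
--                 subsecoes.append(subsecao_atual)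
--
--             subsecao_atual = {
--                 'subtitulo': linha_limpa,
--                 'conteudo': ''
--             }
--         elif subsecao_atual and linha_limpa:
--             if subsecao_atual['conteudo']:
--                 subsecao_atual['conteudo'] += '\n' + linha
--             else:
--                 subsecao_atual['conteudo'] = linha
--
--     # Adiciona última subseção
--     if subsecao_atual:
--         subsecoes.append(subsecao_atual)
--
--     return subsecoes
-- ===== SOURCE B (Python) =====
-- def extrair_subsecoes(conteudo):
--     """Extrai subseções: segmentação recursiva (cabeçalho + bloco até o próximo cabeçalho)."""
--     def eh_titulo(linha):
--         t = linha.strip()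
--         return t.endswith(':') and len(t) > 3
--
--     def segmenta(linhas):
--         if not linhas:
--             return []
--         if not eh_titulo(linhas[0]):
--             return segmenta(linhas[1:])
--         j = 1
--         while j < len(linhas) and not eh_titulo(linhas[j]):
--             j += 1
--         corpo = '\n'.join(l for l in linhas[1:j] if l.strip())
--         return [{'subtitulo': linhas[0].strip(), 'conteudo': corpo}] + segmenta(linhas[j:])
--
--     return segmenta(conteudo.split('\n'))
-- ===== Notes on version B (the rewrite author's own statement) =====
-- stated objective: alternative
-- what changed: A's single pass with a mutable current-section accumulator (appending line by line) is replaced by a recursive segmentation that, at each header line, slices off the whole block up to the next header, filters its blank lines and joins it at once.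
import Mathlib
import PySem

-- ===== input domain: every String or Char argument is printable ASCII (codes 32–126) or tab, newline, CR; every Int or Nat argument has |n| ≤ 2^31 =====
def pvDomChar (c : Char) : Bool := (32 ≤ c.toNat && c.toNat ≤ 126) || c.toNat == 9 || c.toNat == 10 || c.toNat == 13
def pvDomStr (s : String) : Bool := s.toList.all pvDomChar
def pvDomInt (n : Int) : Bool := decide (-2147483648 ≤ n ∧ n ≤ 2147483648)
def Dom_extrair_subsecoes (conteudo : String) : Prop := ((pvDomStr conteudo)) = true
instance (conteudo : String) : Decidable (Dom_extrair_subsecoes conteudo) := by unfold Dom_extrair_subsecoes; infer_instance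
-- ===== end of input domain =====

-- B replaces A's single-pass mutable-accumulator loop by a recursive segmentation
-- (a header, then its whole block of lines up to the next header, joined at once); objective: alternative.

-- ===== PORT A =====
-- the body of A's for-loop: state = (subsecoes, subsecao_atual as Option (subtitulo, conteudo))
def pvStepA (st : List (List (String × String)) × Option (String × String)) (linha : String) :
    List (List (String × String)) × Option (String × String) :=
  let limpa := PySem.Str.strip linha
  if PySem.Str.endswith limpa ":" && decide (3 < PySem.Str.len limpa) then
    match st.2 with
    | some d => (st.1 ++ [[("subtitulo", d.1), ("conteudo", d.2)]], some (limpa, ""))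
    | none => (st.1, some (limpa, ""))
  else
    match st.2 with
    | some d =>
        if limpa ≠ "" then
          (st.1, some (d.1, if d.2 ≠ "" then d.2 ++ "\n" ++ linha else linha))
        else st
    | none => st

-- the trailing "if subsecao_atual: subsecoes.append(subsecao_atual)"
def pvFinishA (st : List (List (String × String)) × Option (String × String)) :
    List (List (String × String)) :=
  match st.2 with
  | some d => st.1 ++ [[("subtitulo", d.1), ("conteudo", d.2)]]
  | none => st.1

def extrair_subsecoes (conteudo : String) : List (List (String × String)) :=
  let linhas := (PySem.Str.split? conteudo "\n").getD []   -- sep "\n" ≠ "", so split? is always some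
  pvFinishA (linhas.foldl pvStepA ([], none))

-- ===== PORT B =====
-- eh_titulo of Source B
def pvIsHdr (linha : String) : Bool :=
  PySem.Str.endswith (PySem.Str.strip linha) ":" && decide (3 < PySem.Str.len (PySem.Str.strip linha))

-- segmenta of Source B: skip to a header, take its block of lines up to the next header, recurse
def pvSegment : List String → List (List (String × String))
  | [] => []
  | l :: ls =>
    if pvIsHdr l then
      [("subtitulo", PySem.Str.strip l),
       ("conteudo", PySem.Str.join "\n" ((ls.takeWhile (fun x => !pvIsHdr x)).filter
          (fun x => PySem.Str.strip x ≠ "")))]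
        :: pvSegment (ls.dropWhile (fun x => !pvIsHdr x))
    else pvSegment ls
termination_by ls => ls.length
decreasing_by
  · exact Nat.lt_succ_of_le (List.length_dropWhile_le _ _)
  · exact Nat.lt_succ_of_le (Nat.le_refl _)

def extrair_subsecoes_alt (conteudo : String) : List (List (String × String)) :=
  pvSegment ((PySem.Str.split? conteudo "\n").getD [])

-- ===== PRECONDITION & SPEC =====
def Spec_extrair_subsecoes (conteudo : String) (out : List (List (String × String))) : Prop := out = extrair_subsecoes_alt conteudo
instance (conteudo : String) (out : List (List (String × String))) : Decidable (Spec_extrair_subsecoes conteudo out) := by unfold Spec_extrair_subsecoes; infer_instance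

-- ===== CLAIM (what is proved, stated in full; the proofs are below) =====
def Claim_equal_extrair_subsecoes : Prop := ∀ (conteudo : String), Dom_extrair_subsecoes conteudo → Spec_extrair_subsecoes conteudo (extrair_subsecoes conteudo)

-- ===== LEMMAS AND PROOFS =====

-- A's incremental way of building a section's content
def pvJoinAcc (c : String) : List String → String
  | [] => c
  | x :: xs => pvJoinAcc (if c ≠ "" then c ++ "\n" ++ x else x) xs

theorem pvCharsJoinGlue (sep a b : List Char) (rest : List (List Char)) :
    PySem.Chars.join sep ((a ++ sep ++ b) :: rest) = a ++ sep ++ PySem.Chars.join sep (b :: rest) := by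
  cases rest with
  | nil => simp [PySem.Chars.join_singleton]
  | cons r rs => simp [PySem.Chars.join_cons_cons, List.append_assoc]

theorem pvJoinAcc_ne (xs : List String) (c : String) (hc : c ≠ "") :
    pvJoinAcc c xs = PySem.Str.join "\n" (c :: xs) := by
  induction xs generalizing c with
  | nil =>
    apply String.toList_inj.mp
    simp [pvJoinAcc, PySem.Str.toList_join]
  | cons x xs ih =>
    have hc' : c ++ "\n" ++ x ≠ "" := by
      intro h
      have := congrArg String.toList h
      simp [String.toList_append] at this
    simp only [pvJoinAcc, if_pos hc]
    rw [ih _ hc']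
    apply String.toList_inj.mp
    simp only [PySem.Str.toList_join, List.map_cons, String.toList_append]
    rw [pvCharsJoinGlue, PySem.Chars.join_cons_cons]

theorem pvJoinAcc_empty (xs : List String) (h : ∀ x ∈ xs, x ≠ "") :
    pvJoinAcc "" xs = PySem.Str.join "\n" xs := by
  cases xs with
  | nil =>
    apply String.toList_inj.mp
    simp [pvJoinAcc, PySem.Str.toList_join, PySem.Chars.join_nil]
  | cons x xs =>
    have : pvJoinAcc "" (x :: xs) = pvJoinAcc x xs := by simp [pvJoinAcc]
    rw [this, pvJoinAcc_ne xs x (h x (by simp))]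

theorem pvL2 (ls : List String) (subs : List (List (String × String))) (t c : String) :
    pvFinishA (ls.foldl pvStepA (subs, some (t, c))) =
      subs ++ [("subtitulo", t),
        ("conteudo", pvJoinAcc c ((ls.takeWhile (fun x => !pvIsHdr x)).filter
          (fun x => PySem.Str.strip x ≠ "")))]
        :: pvSegment (ls.dropWhile (fun x => !pvIsHdr x)) := by
  induction ls generalizing subs t c with
  | nil => simp [pvFinishA, pvJoinAcc, pvSegment]
  | cons l ls ih =>
    have hcond : (PySem.Str.endswith (PySem.Str.strip l) ":" && decide (3 < PySem.Str.len (PySem.Str.strip l))) = pvIsHdr l := rfl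
    cases h : pvIsHdr l with
    | true =>
      have hstep : pvStepA (subs, some (t, c)) l =
          (subs ++ [[("subtitulo", t), ("conteudo", c)]], some (PySem.Str.strip l, "")) := by
        simp only [pvStepA]
        rw [hcond, h]
        rfl
      have hfilter : ∀ x ∈ (ls.takeWhile (fun x => !pvIsHdr x)).filter
          (fun x => PySem.Str.strip x ≠ ""), x ≠ "" := by
        intro x hx
        have := (List.mem_filter.mp hx).2
        intro hxe
        simp [hxe] at this
        exact this (by decide)
      simp only [List.foldl_cons, hstep, ih]
      rw [pvJoinAcc_empty _ hfilter]
      simp [pvSegment, h, pvJoinAcc]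
    | false =>
      by_cases hs : PySem.Str.strip l = ""
      · have hstep : pvStepA (subs, some (t, c)) l = (subs, some (t, c)) := by
          simp only [pvStepA]
          rw [hcond, h]
          simp [hs]
        simp only [List.foldl_cons, hstep, ih]
        simp [h, hs]
      · have hstep : pvStepA (subs, some (t, c)) l =
            (subs, some (t, if c ≠ "" then c ++ "\n" ++ l else l)) := by
          simp only [pvStepA]
          rw [hcond, h]
          simp [hs]
        simp only [List.foldl_cons, hstep, ih]
        simp only [List.takeWhile_cons, List.dropWhile_cons, h]
        simp [pvJoinAcc, hs]

theorem pvL1 (ls : List String) (subs : List (List (String × String))) :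
    pvFinishA (ls.foldl pvStepA (subs, none)) = subs ++ pvSegment ls := by
  induction ls generalizing subs with
  | nil => simp [pvFinishA, pvSegment]
  | cons l ls ih =>
    have hcond : (PySem.Str.endswith (PySem.Str.strip l) ":" && decide (3 < PySem.Str.len (PySem.Str.strip l))) = pvIsHdr l := rfl
    cases h : pvIsHdr l with
    | true =>
      have hstep : pvStepA (subs, none) l = (subs, some (PySem.Str.strip l, "")) := by
        simp only [pvStepA]
        rw [hcond, h]
        rfl
      have hfilter : ∀ x ∈ (ls.takeWhile (fun x => !pvIsHdr x)).filter
          (fun x => PySem.Str.strip x ≠ ""), x ≠ "" := by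
        intro x hx
        have := (List.mem_filter.mp hx).2
        intro hxe
        simp [hxe] at this
        exact this (by decide)
      simp only [List.foldl_cons, hstep, pvL2]
      rw [pvJoinAcc_empty _ hfilter]
      simp [pvSegment, h]
    | false =>
      have hstep : pvStepA (subs, none) l = (subs, none) := by
        simp only [pvStepA]
        rw [hcond, h]
        rfl
      simp only [List.foldl_cons, hstep, ih]
      simp [pvSegment, h]

-- ===== VERDICT (by name: the statement is the Claim_ definition above) =====
theorem extrair_subsecoes_spec : Claim_equal_extrair_subsecoes := by
  intro conteudo _
  unfold Spec_extrair_subsecoes extrair_subsecoes extrair_subsecoes_alt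
  simpa using pvL1 ((PySem.Str.split? conteudo "\n").getD []) []
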